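-- pv_equiv track=rewrite | github.com/771452430/-agent | backend/app/services/knowledge_store.py | _reconstruct_chunk_text
-- ===== SOURCE A (Python) =====
-- def _reconstruct_chunk_text(chunks: list[str], max_overlap: int = 200) -> str:
--     if not chunks:
--         return ""
--     restored = chunks[0]
--     for chunk in chunks[1:]:
--         best_overlap = 0
--         upper = min(max_overlap, len(restored), len(chunk))
--         for size in range(upper, 19, -1):
--             if restored.endswith(chunk[:size]):
--                 best_overlap = size
--                 break
--         restored += chunk[best_overlap:]
--     return restored
-- ===== SOURCE B (Python) =====
-- def _reconstruct_chunk_text(chunks: list[str], max_overlap: int = 200) -> str: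
--     if not chunks:
--         return ""
--     parts = [chunks[0]]
--     total = len(chunks[0])
--     tail = chunks[0][-max_overlap:] if max_overlap > 0 else ""
--     for chunk in chunks[1:]:
--         upper = min(max_overlap, total, len(chunk))
--         best = 0
--         if upper >= 20:
--             probe = chunk[:20]
--             window = tail[len(tail) - upper:]
--             p = window.find(probe)
--             while p != -1:
--                 if window[p:] == chunk[:upper - p]:
--                     best = upper - p
--                     break
--                 p = window.find(probe, p + 1)
--         parts.append(chunk[best:])
--         total += len(chunk) - best
--         tail += chunk[best:]
--         if max_overlap > 0 and len(tail) > 2 * max_overlap: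
--             tail = tail[-max_overlap:]
--     return "".join(parts)
-- ===== Notes on version B (the rewrite author's own statement) =====
-- stated objective: alternative
-- what changed: B locates candidate overlaps by searching a 20-char probe with str.find inside a bounded tail window of at most 2*max_overlap characters and verifies a full match only at probe occurrences, building the result as a parts list joined once, instead of A's per-size endswith scan with break over the whole accumulated string.
import Mathlib
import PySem

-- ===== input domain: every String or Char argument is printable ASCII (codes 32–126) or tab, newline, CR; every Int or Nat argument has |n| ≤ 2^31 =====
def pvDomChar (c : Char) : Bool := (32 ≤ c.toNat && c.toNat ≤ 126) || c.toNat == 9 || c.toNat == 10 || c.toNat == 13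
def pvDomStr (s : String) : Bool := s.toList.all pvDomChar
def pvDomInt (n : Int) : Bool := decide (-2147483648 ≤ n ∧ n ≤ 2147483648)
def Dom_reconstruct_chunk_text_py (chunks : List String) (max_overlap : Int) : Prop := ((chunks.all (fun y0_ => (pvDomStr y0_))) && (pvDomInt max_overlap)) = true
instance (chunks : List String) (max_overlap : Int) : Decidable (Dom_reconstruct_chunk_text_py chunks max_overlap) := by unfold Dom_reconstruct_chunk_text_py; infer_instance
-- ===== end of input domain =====

-- B finds candidate overlaps with str.find of a 20-char probe inside a bounded tail window,
-- verifying only at probe occurrences, and joins a parts list once at the end, instead of A's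
-- per-size endswith scan over the whole accumulated string (objective: alternative).

-- ===== PORT A =====
-- inner loop 'for size in range(upper, 19, -1): if restored.endswith(chunk[:size]): best = size; break'
def pvAFind (restored chunk : List Char) : List Int → Int
  | [] => 0
  | s :: rest =>
    if PySem.Chars.endswith restored (PySem.Chars.slice chunk none (some s)) then s
    else pvAFind restored chunk rest

-- one iteration of A's outer loop: 'restored += chunk[best_overlap:]'
def pvAStep (max_overlap : Int) (restored chunk : List Char) : List Char :=
  let upper := min max_overlap (min (restored.length : Int) (chunk.length : Int))
  let best := pvAFind restored chunk (PySem.List.pyRange upper 19 (-1))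
  restored ++ PySem.Chars.slice chunk (some best) none

def reconstruct_chunk_text_py (chunks : List String) (max_overlap : Int) : String :=
  match chunks with
  | [] => ""
  | c0 :: rest =>
    String.ofList ((rest.map String.toList).foldl (fun r ch => pvAStep max_overlap r ch) c0.toList)

-- ===== PORT B =====
-- the 'while p != -1' probe-search loop; fuel only makes the recursion total (p strictly increases)
def pvBScan (window chunk probe : List Char) (upper p : Int) (fuel : Nat) : Int :=
  match fuel with
  | 0 => 0
  | Nat.succ f =>
    if p = -1 then 0
    else if PySem.Chars.slice window (some p) none = PySem.Chars.slice chunk none (some (upper - p))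
    then upper - p
    else pvBScan window chunk probe upper (PySem.Chars.findFrom window probe (p + 1) none) f

-- one iteration of B's loop over the state (parts, total, tail)
def pvBStep (max_overlap : Int) (st : List (List Char) × Int × List Char) (chunk : List Char) :
    List (List Char) × Int × List Char :=
  let upper := min max_overlap (min st.2.1 (chunk.length : Int))
  let best :=
    if 20 ≤ upper then
      let probe := PySem.Chars.slice chunk none (some 20)
      let window := PySem.Chars.slice st.2.2 (some ((st.2.2.length : Int) - upper)) none
      pvBScan window chunk probe upper (PySem.Chars.find window probe) (window.length + 1)
    else 0
  let t2 := st.2.2 ++ PySem.Chars.slice chunk (some best) none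
  (st.1 ++ [PySem.Chars.slice chunk (some best) none],
   st.2.1 + (chunk.length : Int) - best,
   if 0 < max_overlap ∧ 2 * max_overlap < (t2.length : Int)
   then PySem.Chars.slice t2 (some (-max_overlap)) none
   else t2)

def reconstruct_chunk_text_py_alt (chunks : List String) (max_overlap : Int) : String :=
  match chunks with
  | [] => ""
  | c0 :: rest =>
    let tail0 := if 0 < max_overlap then PySem.Chars.slice c0.toList (some (-max_overlap)) none else []
    let st := (rest.map String.toList).foldl (pvBStep max_overlap)
        ([c0.toList], (c0.toList.length : Int), tail0)
    String.ofList (PySem.Chars.join [] st.1)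

-- ===== PRECONDITION & SPEC =====
def Spec_reconstruct_chunk_text_py (chunks : List String) (max_overlap : Int) (out : String) : Prop := out = reconstruct_chunk_text_py_alt chunks max_overlap
instance (chunks : List String) (max_overlap : Int) (out : String) : Decidable (Spec_reconstruct_chunk_text_py chunks max_overlap out) := by unfold Spec_reconstruct_chunk_text_py; infer_instance

-- ===== CLAIM (what is proved, stated in full; the proofs are below) =====
def Claim_equal_reconstruct_chunk_text_py : Prop := ∀ (chunks : List String) (max_overlap : Int), Dom_reconstruct_chunk_text_py chunks max_overlap → Spec_reconstruct_chunk_text_py chunks max_overlap (reconstruct_chunk_text_py chunks max_overlap)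

-- ===== LEMMAS AND PROOFS =====

-- joining with the empty separator is flatten
lemma pv_join_nil (ps : List (List Char)) : PySem.Chars.join [] ps = ps.flatten := by
  simp only [PySem.Chars.join, List.intercalate]
  induction ps with
  | nil => rfl
  | cons a t ih =>
    cases t with
    | nil => simp [List.intersperse]
    | cons b t' => simpa [List.intersperse] using ih

-- first match of a descending scan, abstracted over the predicate
def pvFirst (P : Int → Bool) : List Int → Int
  | [] => 0
  | s :: rest => if P s then s else pvFirst P rest

lemma pvAFind_eq_first (r ch : List Char) (l : List Int) :
    pvAFind r ch l =
    pvFirst (fun s => PySem.Chars.endswith r (PySem.Chars.slice ch none (some s))) l := by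
  induction l with
  | nil => rfl
  | cons a t ih => simp only [pvAFind, pvFirst, ih]

lemma pvFirst_zero_or_mem (P : Int → Bool) (l : List Int) :
    pvFirst P l = 0 ∨ pvFirst P l ∈ l := by
  induction l with
  | nil => left; rfl
  | cons a t ih =>
    simp only [pvFirst]
    by_cases hp : P a
    · simp [hp]
    · rcases ih with h | h
      · left; simpa [hp] using h
      · right; simp only [hp]; exact List.mem_cons_of_mem _ h

-- pointwise: A's endswith test equals B's tail-window test, for sizes in [20, u]
lemma pv_pred_eq (r ch tail : List Char) (mo s : Int)
    (hsuf : tail <:+ r) (hlen : min mo.toNat r.length ≤ tail.length)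
    (hs0 : 20 ≤ s) (hsm : s ≤ mo) (hsr : s ≤ (r.length : Int)) (hsc : s ≤ (ch.length : Int)) :
    PySem.Chars.endswith r (PySem.Chars.slice ch none (some s)) =
    decide (PySem.Chars.slice ch none (some s) =
            PySem.Chars.slice tail (some ((tail.length : Int) - s)) none) := by
  have htail : tail = r.drop (r.length - tail.length) := List.suffix_iff_eq_drop.mp hsuf
  have hler : tail.length ≤ r.length := hsuf.length_le
  have hslen : s.toNat ≤ tail.length := by omega
  simp only [PySem.Chars.slice_eq_listSlice]
  simp only [PySem.List.slice_to ch (by omega : (0:Int) ≤ s),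
      PySem.List.slice_from tail (by omega : (0:Int) ≤ (tail.length : Int) - s)]
  have hdrop : tail.drop (((tail.length : Int) - s).toNat) = r.drop (r.length - s.toNat) := by
    have hstep : tail.drop (((tail.length : Int) - s).toNat) =
        (r.drop (r.length - tail.length)).drop (((tail.length : Int) - s).toNat) := by
      rw [← htail]
    rw [hstep, List.drop_drop]
    congr 1
    omega
  rw [hdrop]
  have hlen_take : (ch.take s.toNat).length = s.toNat := by
    rw [List.length_take]; omega
  rcases Bool.eq_false_or_eq_true (PySem.Chars.endswith r (ch.take s.toNat)) with hb | hb <;> rw [hb]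
  · symm; rw [decide_eq_true_iff]
    rw [PySem.Chars.endswith_iff] at hb
    rw [List.suffix_iff_eq_drop] at hb
    rw [hb, hlen_take]
  · symm; rw [decide_eq_false_iff_not]
    intro heq
    rw [Bool.eq_false_iff] at hb
    apply hb
    rw [PySem.Chars.endswith_iff]
    rw [heq]
    exact List.drop_suffix _ _

-- the invariant tying B's state (parts, total, tail) to A's accumulated string r
def pvInv (max_overlap : Int) (r : List Char) (st : List (List Char) × Int × List Char) : Prop :=
  PySem.Chars.join [] st.1 = r ∧ st.2.1 = (r.length : Int) ∧
  (0 < max_overlap → st.2.2 <:+ r ∧ min max_overlap.toNat r.length ≤ st.2.2.length)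

lemma pvFirst_congr (P Q : Int → Bool) (l : List Int) (h : ∀ x ∈ l, P x = Q x) :
    pvFirst P l = pvFirst Q l := by
  induction l with
  | nil => rfl
  | cons a t ih =>
    simp only [pvFirst]
    rw [h a (List.mem_cons_self), ih (fun x hx => h x (List.mem_cons_of_mem _ hx))]

lemma pvFirst_all_false (P : Int → Bool) (l : List Int) (h : ∀ x ∈ l, P x = false) :
    pvFirst P l = 0 := by
  induction l with
  | nil => rfl
  | cons a t ih =>
    simp only [pvFirst, h a (List.mem_cons_self)]
    exact ih (fun x hx => h x (List.mem_cons_of_mem _ hx))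

-- skip sizes on which the predicate is false
-- skip sizes on which the predicate is false
lemma pvFirst_skip (P : Int → Bool) (a b : Int) (hba : b ≤ a)
    (h : ∀ x, b < x → x ≤ a → P x = false) :
    pvFirst P (PySem.List.pyRange a 19 (-1)) = pvFirst P (PySem.List.pyRange b 19 (-1)) := by
  suffices H : ∀ k (a : Int), b ≤ a → (∀ x, b < x → x ≤ a → P x = false) → (a - b).toNat = k →
      pvFirst P (PySem.List.pyRange a 19 (-1)) = pvFirst P (PySem.List.pyRange b 19 (-1)) by
    exact H (a - b).toNat a hba h rfl
  intro k
  induction k with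
  | zero =>
    intro a hba h hg
    have : a = b := by omega
    rw [this]
  | succ k ih =>
    intro a hba h hg
    have hba' : b < a := by omega
    by_cases h19 : a ≤ 19
    · rw [PySem.List.pyRange_neg_one_eq_nil h19, PySem.List.pyRange_neg_one_eq_nil (by omega)]
    · rw [PySem.List.pyRange_neg_one_cons (by omega : (19:Int) < a)]
      simp only [pvFirst, h a hba' le_rfl, Bool.false_eq_true, if_false]
      exact ih (a - 1) (by omega) (fun x hx1 hx2 => h x hx1 (by omega)) (by omega)

-- the probe-search loop computes the first (i.e. largest-size) full match, scanning from position s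
lemma pv_scan_aux (W ch probe : List Char) (s fuel : Nat)
    (hprobe : probe = ch.take 20) (h20 : 20 ≤ W.length) (hWc : W.length ≤ ch.length)
    (hs : s ≤ W.length) (hfuel : W.length + 1 - s ≤ fuel) :
    pvBScan W ch probe (W.length : Int) (PySem.Chars.findFrom W probe (s : Int) none) fuel =
    pvFirst (fun sz => decide (W.drop (((W.length : Int) - sz)).toNat = ch.take sz.toNat))
      (PySem.List.pyRange ((W.length : Int) - (s : Int)) 19 (-1)) := by
  -- a full match of size sz = |W| - p forces the probe to occur at p
  have hnec : ∀ p : Nat, p + 20 ≤ W.length → W.drop p = ch.take (W.length - p) →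
      probe <+: W.drop p := by
    intro p hp hm
    rw [hm, hprobe]
    have : ch.take 20 = (ch.take (W.length - p)).take 20 := by
      rw [List.take_take]
      congr 1
      omega
    rw [this]
    exact List.take_prefix _ _
  have hprlen : probe.length = 20 := by
    rw [hprobe, List.length_take]; omega
  induction fuel generalizing s with
  | zero => omega
  | succ f ih =>
    by_cases hneg : PySem.Chars.findFrom W probe (s : Int) none = -1
    · rw [hneg]
      simp only [pvBScan, if_true]
      symm
      apply pvFirst_all_false
      intro sz hsz
      rw [PySem.List.mem_pyRange_neg_one] at hsz
      rw [decide_eq_false_iff_not]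
      intro hm
      rw [PySem.Chars.findFrom_natCast_eq_neg_one_iff W probe s hs] at hneg
      apply hneg
      have hq : (((W.length : Int) - sz)).toNat = W.length - sz.toNat := by omega
      rw [hq] at hm
      have hWsz : W.length - (W.length - sz.toNat) = sz.toNat := by omega
      have hpref : probe <+: W.drop (W.length - sz.toNat) := by
        apply hnec (W.length - sz.toNat) (by omega)
        rw [hWsz]; exact hm
      have hdd : W.drop (W.length - sz.toNat) = (W.drop s).drop (W.length - sz.toNat - s) := by
        rw [List.drop_drop]; congr 1; omega
      rw [hdd] at hpref
      exact hpref.isInfix.trans (List.drop_suffix _ _).isInfix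
    · obtain ⟨hsp, hocc, hfirst⟩ := PySem.Chars.findFrom_natCast_spec W probe s hs hneg
      set p : Int := PySem.Chars.findFrom W probe (s : Int) none with hp
      have hp20 : p.toNat + 20 ≤ W.length := by
        have hll := hocc.length_le
        rw [List.length_drop, hprlen] at hll
        omega
      have hpN : p = ((p.toNat : Nat) : Int) := by omega
      -- skip the sizes whose positions precede the probe occurrence
      have hskip : pvFirst (fun sz => decide (W.drop (((W.length : Int) - sz)).toNat = ch.take sz.toNat))
          (PySem.List.pyRange ((W.length : Int) - (s : Int)) 19 (-1)) =
          pvFirst (fun sz => decide (W.drop (((W.length : Int) - sz)).toNat = ch.take sz.toNat))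
          (PySem.List.pyRange ((W.length : Int) - p) 19 (-1)) := by
        apply pvFirst_skip _ ((W.length : Int) - (s : Int)) ((W.length : Int) - p) (by omega)
        intro x hx1 hx2
        rw [decide_eq_false_iff_not]
        intro hm
        have hq : (((W.length : Int) - x)).toNat = W.length - x.toNat := by omega
        rw [hq] at hm
        have hx20 : 20 ≤ x := by
          by_contra hlt
          have hlen := congrArg List.length hm
          simp only [List.length_drop, List.length_take] at hlen
          omega
        apply hfirst (W.length - x.toNat) (by omega) (by omega)
        apply hnec (W.length - x.toNat) (by omega)
        have hWx : W.length - (W.length - x.toNat) = x.toNat := by omega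
        rw [hWx]; exact hm
      rw [hskip]
      have hgt19 : (19:Int) < (W.length : Int) - p := by omega
      rw [PySem.List.pyRange_neg_one_cons hgt19]
      simp only [pvFirst]
      -- the loop's test at p is the fold's test at size |W| - p
      have hsl1 : PySem.Chars.slice W (some p) none = W.drop p.toNat := by
        simp only [PySem.Chars.slice_eq_listSlice]
        exact PySem.List.slice_from W (by omega)
      have hsl2 : PySem.Chars.slice ch none (some ((W.length : Int) - p)) = ch.take (((W.length : Int) - p)).toNat := by
        simp only [PySem.Chars.slice_eq_listSlice]
        exact PySem.List.slice_to ch (by omega)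
      have hq : (((W.length : Int) - ((W.length : Int) - p))).toNat = p.toNat := by omega
      by_cases ht : PySem.Chars.slice W (some p) none = PySem.Chars.slice ch none (some ((W.length : Int) - p))
      · rw [show pvBScan W ch probe (W.length : Int) p (f + 1) = (W.length : Int) - p by
          simp only [pvBScan]; rw [if_neg (by omega), if_pos ht]]
        rw [hsl1, hsl2] at ht
        rw [if_pos (by rw [decide_eq_true_iff, hq]; exact ht)]
      · rw [show pvBScan W ch probe (W.length : Int) p (f + 1) =
            pvBScan W ch probe (W.length : Int) (PySem.Chars.findFrom W probe (p + 1) none) f by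
          simp only [pvBScan]; rw [if_neg (by omega), if_neg ht]]
        rw [hsl1, hsl2] at ht
        rw [if_neg (by rw [decide_eq_true_iff, hq]; exact ht)]
        have hcast : p + 1 = (((p.toNat + 1 : Nat)) : Int) := by omega
        rw [hcast]
        have := ih (p.toNat + 1) (by omega) (by omega)
        rw [this]
        congr 2
        omega

lemma pv_step (mo : Int) (r ch : List Char) (st : List (List Char) × Int × List Char)
    (h : pvInv mo r st) : pvInv mo (pvAStep mo r ch) (pvBStep mo st ch) := by
  obtain ⟨h1, h2, h3⟩ := h
  set u : Int := min mo (min (r.length : Int) (ch.length : Int)) with hu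
  set P : Int → Bool := fun s => PySem.Chars.endswith r (PySem.Chars.slice ch none (some s)) with hP
  -- B computed the same best overlap as A
  have hbest :
      (if 20 ≤ u then
        pvBScan (PySem.Chars.slice st.2.2 (some ((st.2.2.length : Int) - u)) none) ch
          (PySem.Chars.slice ch none (some 20)) u
          (PySem.Chars.find (PySem.Chars.slice st.2.2 (some ((st.2.2.length : Int) - u)) none)
            (PySem.Chars.slice ch none (some 20)))
          ((PySem.Chars.slice st.2.2 (some ((st.2.2.length : Int) - u)) none).length + 1)
      else 0) = pvAFind r ch (PySem.List.pyRange u 19 (-1)) := by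
    rw [pvAFind_eq_first]
    by_cases h20 : 20 ≤ u
    · rw [if_pos h20]
      have hmo : 0 < mo := by omega
      obtain ⟨hsuf, hlen⟩ := h3 hmo
      have htail : st.2.2 = r.drop (r.length - st.2.2.length) := List.suffix_iff_eq_drop.mp hsuf
      have hler : st.2.2.length ≤ r.length := hsuf.length_le
      set W := PySem.Chars.slice st.2.2 (some ((st.2.2.length : Int) - u)) none with hW
      have hWd : W = st.2.2.drop (((st.2.2.length : Int) - u)).toNat := by
        rw [hW]
        simp only [PySem.Chars.slice_eq_listSlice]
        exact PySem.List.slice_from _ (by omega)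
      have hWlen : W.length = u.toNat := by
        rw [hWd]; simp [List.length_drop]; omega
      have hWr : ∀ k : Nat, k ≤ u.toNat → W.drop (u.toNat - k) = r.drop (r.length - k) := by
        intro k hk
        have hstep : st.2.2.drop (((st.2.2.length : Int) - u)).toNat =
            (r.drop (r.length - st.2.2.length)).drop (((st.2.2.length : Int) - u)).toNat := by
          rw [← htail]
        rw [hWd, hstep, List.drop_drop, List.drop_drop]
        congr 1
        omega
      have hprobe : PySem.Chars.slice ch none (some 20) = ch.take 20 := by
        simp only [PySem.Chars.slice_eq_listSlice]
        rw [PySem.List.slice_to ch (by omega : (0:Int) ≤ 20)]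
        rfl
      rw [hprobe]
      have := pv_scan_aux W ch (ch.take 20) 0 (W.length + 1) rfl (by omega) (by omega) (by omega) (by omega)
      simp only [Nat.cast_zero, sub_zero] at this
      rw [PySem.Chars.findFrom_zero] at this
      have hcast : ((W.length : Int)) = u := by omega
      rw [hcast] at this
      rw [this]
      apply pvFirst_congr
      intro sz hsz
      rw [PySem.List.mem_pyRange_neg_one] at hsz
      rw [pv_pred_eq r ch st.2.2 mo sz hsuf hlen (by omega) (by omega) (by omega) (by omega)]
      have hdW : W.drop ((u - sz)).toNat = st.2.2.drop (((st.2.2.length : Int) - sz)).toNat := by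
        rw [hWd, List.drop_drop]
        congr 1
        omega
      have hchs : PySem.Chars.slice ch none (some sz) = ch.take sz.toNat := by
        simp only [PySem.Chars.slice_eq_listSlice]
        exact PySem.List.slice_to ch (by omega)
      have htls : PySem.Chars.slice st.2.2 (some ((st.2.2.length : Int) - sz)) none =
          st.2.2.drop (((st.2.2.length : Int) - sz)).toNat := by
        simp only [PySem.Chars.slice_eq_listSlice]
        exact PySem.List.slice_from _ (by omega)
      rw [hchs, htls, ← hdW]
      simp only [decide_eq_decide]
      constructor
      · intro h'; rw [h']
      · intro h'; rw [h']
    · rw [if_neg h20]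
      symm
      apply pvFirst_all_false
      intro x hx
      rw [PySem.List.mem_pyRange_neg_one] at hx
      omega
  set best := pvAFind r ch (PySem.List.pyRange u 19 (-1)) with hb
  have hbrange : best = 0 ∨ (19 < best ∧ best ≤ u) := by
    rcases pvFirst_zero_or_mem
        (fun s => PySem.Chars.endswith r (PySem.Chars.slice ch none (some s)))
        (PySem.List.pyRange u 19 (-1)) with h0 | hmem
    · left; rw [hb, pvAFind_eq_first]; exact h0
    · right
      have : best ∈ PySem.List.pyRange u 19 (-1) := by rw [hb, pvAFind_eq_first]; exact hmem
      rw [PySem.List.mem_pyRange_neg_one] at this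
      omega
  have hb0 : 0 ≤ best := by rcases hbrange with h0 | h0 <;> omega
  have hbc : best ≤ (ch.length : Int) := by rcases hbrange with h0 | h0 <;> omega
  have hslice : PySem.Chars.slice ch (some best) none = ch.drop best.toNat := by
    simp only [PySem.Chars.slice_eq_listSlice]
    exact PySem.List.slice_from ch hb0
  have hAs : pvAStep mo r ch = r ++ PySem.Chars.slice ch (some best) none := rfl
  have hBs : pvBStep mo st ch =
      (st.1 ++ [PySem.Chars.slice ch (some best) none],
       st.2.1 + (ch.length : Int) - best,
       if 0 < mo ∧ 2 * mo < (((st.2.2 ++ PySem.Chars.slice ch (some best) none).length : Nat) : Int)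
       then PySem.Chars.slice (st.2.2 ++ PySem.Chars.slice ch (some best) none) (some (-mo)) none
       else st.2.2 ++ PySem.Chars.slice ch (some best) none) := by
    simp only [pvBStep]
    rw [h2, ← hu, hbest]
  rw [hAs, hBs]
  unfold pvInv
  refine ⟨?_, ?_, ?_⟩
  · show PySem.Chars.join [] (st.1 ++ [PySem.Chars.slice ch (some best) none]) = _
    rw [pv_join_nil, List.flatten_append, ← pv_join_nil, h1]
    simp
  · show st.2.1 + (ch.length : Int) - best = _
    rw [h2, hslice]
    simp only [List.length_append, List.length_drop]
    push_cast
    omega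
  · intro hmo
    obtain ⟨hsuf, hlen⟩ := h3 hmo
    set x := PySem.Chars.slice ch (some best) none with hx
    have hxlen : x.length = ch.length - best.toNat := by rw [hslice, List.length_drop]
    have hsuf2 : st.2.2 ++ x <:+ r ++ x := by
      obtain ⟨pre, hpre⟩ := hsuf
      exact ⟨pre, by rw [← List.append_assoc, hpre]⟩
    have hler : st.2.2.length ≤ r.length := hsuf.length_le
    show (if 0 < mo ∧ 2 * mo < (((st.2.2 ++ x).length : Nat) : Int) then _ else _) <:+ r ++ x ∧ _
    by_cases hc : 0 < mo ∧ 2 * mo < (((st.2.2 ++ x).length : Nat) : Int)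
    · rw [if_pos hc]
      have hneg : -mo = -((mo.toNat : Int)) := by omega
      simp only [PySem.Chars.slice_eq_listSlice, hneg]
      rw [PySem.List.slice_from_neg_natCast _ mo.toNat (by omega)]
      constructor
      · exact (List.drop_suffix _ _).trans hsuf2
      · have h2c := hc.2
        simp only [List.length_append] at h2c ⊢
        simp only [List.length_drop, List.length_append]
        omega
    · rw [if_neg hc]
      refine ⟨hsuf2, ?_⟩
      simp only [List.length_append]
      omega

lemma pv_fold (mo : Int) (chs : List (List Char)) :
    ∀ (r : List Char) (st : List (List Char) × Int × List Char), pvInv mo r st →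
    pvInv mo (chs.foldl (fun r ch => pvAStep mo r ch) r) (chs.foldl (pvBStep mo) st) := by
  induction chs with
  | nil => intro r st h; exact h
  | cons c t ih =>
    intro r st h
    exact ih _ _ (pv_step mo r c st h)

-- ===== VERDICT (by name: the statement is the Claim_ definition above) =====
theorem reconstruct_chunk_text_py_spec : Claim_equal_reconstruct_chunk_text_py := by
  intro chunks mo _
  unfold Spec_reconstruct_chunk_text_py reconstruct_chunk_text_py reconstruct_chunk_text_py_alt
  cases chunks with
  | nil => rfl
  | cons c0 rest =>
    simp only
    have hinv : pvInv mo c0.toList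
        ([c0.toList], (c0.toList.length : Int),
         if 0 < mo then PySem.Chars.slice c0.toList (some (-mo)) none else []) := by
      refine ⟨by rw [pv_join_nil]; simp, rfl, ?_⟩
      intro hmo
      have hneg : -mo = -((mo.toNat : Int)) := by omega
      simp only [if_pos hmo, PySem.Chars.slice_eq_listSlice, hneg]
      rw [PySem.List.slice_from_neg_natCast _ mo.toNat (by omega)]
      refine ⟨List.drop_suffix _ _, ?_⟩
      simp only [List.length_drop]
      omega
    have := pv_fold mo (rest.map String.toList) c0.toList _ hinv
    obtain ⟨h1, _, _⟩ := this
    rw [h1]
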